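-- pv_equiv track=rewrite | github.com/TC2008B-351/Flask | trafficSystem/aStar.py | get_intermediate_steps
-- ===== SOURCE A (Python) =====
-- def get_intermediate_steps(origin, goal):
--     # Calculate differences in x and y coordinates
--     diff_x = goal[0] - origin[0]
--     diff_y = goal[1] - origin[1]
--
--     # Determine the number of steps needed for each axis
--     num_steps_x = abs(diff_x)
--     num_steps_y = abs(diff_y)
--
--     # Calculate the increment values for each step on x and y axes
--     increment_x = diff_x // num_steps_x if num_steps_x else 0
--     increment_y = diff_y // num_steps_y if num_steps_y else 0
--
--     # Generate the intermediate steps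
--     intermediate_steps = []
--     current_step = origin
--     for _ in range(max(num_steps_x, num_steps_y)):
--         x = current_step[0] + increment_x
--         y = current_step[1] + increment_y
--         current_step = (x, y)
--         intermediate_steps.append(current_step)
--
--     return intermediate_steps
-- ===== SOURCE B (Python) =====
-- def get_intermediate_steps(origin, goal):
--     diff_x = goal[0] - origin[0]
--     diff_y = goal[1] - origin[1]
--     step_x = (diff_x > 0) - (diff_x < 0)
--     step_y = (diff_y > 0) - (diff_y < 0)
--     n = max(abs(diff_x), abs(diff_y))
--     # Compute the final point directly, then walk BACKWARD from it to the
--     # origin, terminating on point equality (no step counter), and reverse.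
--     last = (origin[0] + n * step_x, origin[1] + n * step_y)
--     backwards = []
--     p = last
--     while p != origin:
--         backwards.append(p)
--         p = (p[0] - step_x, p[1] - step_y)
--     backwards.reverse()
--     return backwards
-- ===== Notes on version B (the rewrite author's own statement) =====
-- stated objective: alternative
-- what changed: Instead of stepping forward n times from the origin with a running accumulator, B computes the final point in closed form and walks backward from it toward the origin, terminating on point equality rather than a loop counter, collecting points in reverse and reversing once at the end.
import Mathlib
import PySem

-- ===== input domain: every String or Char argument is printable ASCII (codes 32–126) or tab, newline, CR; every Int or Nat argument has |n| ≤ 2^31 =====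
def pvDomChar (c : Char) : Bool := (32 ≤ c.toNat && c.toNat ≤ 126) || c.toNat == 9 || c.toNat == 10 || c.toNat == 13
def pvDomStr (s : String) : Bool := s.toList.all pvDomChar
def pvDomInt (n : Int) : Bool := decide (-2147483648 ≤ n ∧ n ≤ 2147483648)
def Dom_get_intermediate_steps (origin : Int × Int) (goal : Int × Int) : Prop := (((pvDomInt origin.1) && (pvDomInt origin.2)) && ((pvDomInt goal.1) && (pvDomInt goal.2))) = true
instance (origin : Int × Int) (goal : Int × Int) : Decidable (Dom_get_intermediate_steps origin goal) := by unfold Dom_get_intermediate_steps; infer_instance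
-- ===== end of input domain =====

-- B computes the final point in closed form and walks backward from it to the
-- origin (terminating on point equality), reversing the collected list once;
-- objective: alternative algorithm, same cost.

-- ===== PORT A =====
def get_intermediate_steps (origin : Int × Int) (goal : Int × Int) : List (Int × Int) :=
  let diff_x := goal.1 - origin.1
  let diff_y := goal.2 - origin.2
  let num_steps_x := |diff_x|
  let num_steps_y := |diff_y|
  let increment_x := if num_steps_x ≠ 0 then PySem.Int.floordiv diff_x num_steps_x else 0
  let increment_y := if num_steps_y ≠ 0 then PySem.Int.floordiv diff_y num_steps_y else 0
  let result := (List.range (max num_steps_x num_steps_y).toNat).foldl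
    (fun (st : (Int × Int) × List (Int × Int)) _ =>
      let x := st.1.1 + increment_x
      let y := st.1.2 + increment_y
      let current := (x, y)
      (current, st.2 ++ [current]))
    (origin, [])
  result.2

-- ===== PORT B =====
-- the `while p != origin` loop of Source B; the Nat argument is a fuel bound making
-- the recursion total (always sufficient at the call site), not a loop counter
def pvWalkBack (origin : Int × Int) (sx sy : Int) :
    Nat → (Int × Int) → List (Int × Int) → List (Int × Int)
  | 0, _, acc => acc
  | fuel + 1, p, acc =>
    if p = origin then acc
    else pvWalkBack origin sx sy fuel (p.1 - sx, p.2 - sy) (acc ++ [p])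

def get_intermediate_steps_alt (origin : Int × Int) (goal : Int × Int) : List (Int × Int) :=
  let diff_x := goal.1 - origin.1
  let diff_y := goal.2 - origin.2
  let step_x := (if diff_x > 0 then (1 : Int) else 0) - (if diff_x < 0 then 1 else 0)
  let step_y := (if diff_y > 0 then (1 : Int) else 0) - (if diff_y < 0 then 1 else 0)
  let n := max |diff_x| |diff_y|
  let last := (origin.1 + n * step_x, origin.2 + n * step_y)
  (pvWalkBack origin step_x step_y (n.toNat + 1) last []).reverse

-- ===== PRECONDITION & SPEC =====
def Spec_get_intermediate_steps (origin : Int × Int) (goal : Int × Int) (out : List (Int × Int)) : Prop := out = get_intermediate_steps_alt origin goal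
instance (origin : Int × Int) (goal : Int × Int) (out : List (Int × Int)) : Decidable (Spec_get_intermediate_steps origin goal out) := by unfold Spec_get_intermediate_steps; infer_instance

-- ===== CLAIM (what is proved, stated in full; the proofs are below) =====
def Claim_equal_get_intermediate_steps : Prop := ∀ (origin : Int × Int) (goal : Int × Int), Dom_get_intermediate_steps origin goal → Spec_get_intermediate_steps origin goal (get_intermediate_steps origin goal)

-- ===== LEMMAS AND PROOFS =====

-- A's floor division diff // |diff| is the sign, i.e. B's sign expression, when diff ≠ 0.
theorem pv_floordiv_abs_eq_sign (d : Int) (hd : d ≠ 0) :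
    PySem.Int.floordiv d |d| =
      (if d > 0 then (1 : Int) else 0) - (if d < 0 then 1 else 0) := by
  rcases lt_trichotomy d 0 with h | h | h
  · have habs : |d| = -d := abs_of_neg h
    have hv : PySem.Int.floordiv d (-d) = -1 :=
      (PySem.Int.floordiv_eq_iff_of_pos (by omega)).2 (by constructor <;> nlinarith)
    rw [habs, hv]
    simp [h, not_lt.2 (le_of_lt h)]
  · exact absurd h hd
  · have habs : |d| = d := abs_of_pos h
    have hv : PySem.Int.floordiv d d = 1 :=
      (PySem.Int.floordiv_eq_iff_of_pos h).2 (by constructor <;> nlinarith)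
    rw [habs, hv]
    simp [h, not_lt.2 (le_of_lt h)]

-- A's accumulator loop starting at c with accumulator acc produces
-- acc followed by the points c + (j+1)·inc for j < n.
theorem pv_loop_eq (ix iy : Int) :
    ∀ (n : Nat) (c : Int × Int) (acc : List (Int × Int)),
      ((List.range n).foldl
        (fun (st : (Int × Int) × List (Int × Int)) _ =>
          let x := st.1.1 + ix
          let y := st.1.2 + iy
          let current := (x, y)
          (current, st.2 ++ [current]))
        (c, acc)).2
      = acc ++ (List.range n).map (fun (j : Nat) => (c.1 + ((j : Int) + 1) * ix, c.2 + ((j : Int) + 1) * iy)) := by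
  intro n
  induction n with
  | zero => simp
  | succ n ih =>
    intro c acc
    rw [List.range_succ_eq_map]
    simp only [List.foldl_cons, List.foldl_map, List.map_cons, List.map_map]
    rw [ih (c.1 + ix, c.2 + iy) (acc ++ [(c.1 + ix, c.2 + iy)])]
    simp only [List.append_assoc, List.singleton_append]
    congr 1
    congr 1
    · norm_num
    · apply List.map_congr_left
      intro j _
      simp only [Function.comp_apply]
      push_cast
      simp only [Prod.mk.injEq]; constructor <;> ring

-- B's backward walk, started at origin + k·s with fuel k+1, collects the points
-- origin + (k-j)·s for j < k after acc.
theorem pv_walkback_eq (origin : Int × Int) (sx sy : Int) (hs : ¬ (sx = 0 ∧ sy = 0)) :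
    ∀ (k : Nat) (acc : List (Int × Int)),
      pvWalkBack origin sx sy (k + 1) (origin.1 + (k : Int) * sx, origin.2 + (k : Int) * sy) acc
      = acc ++ (List.range k).map
          (fun (j : Nat) => (origin.1 + ((k : Int) - (j : Int)) * sx, origin.2 + ((k : Int) - (j : Int)) * sy)) := by
  intro k
  induction k with
  | zero => intro acc; simp [pvWalkBack]
  | succ k ih =>
    intro acc
    have hne : ((origin.1 + ((k : Int) + 1) * sx, origin.2 + ((k : Int) + 1) * sy) : Int × Int) ≠ origin := by
      intro h
      have h1 : origin.1 + ((k : Int) + 1) * sx = origin.1 := congrArg Prod.fst h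
      have h2 : origin.2 + ((k : Int) + 1) * sy = origin.2 := congrArg Prod.snd h
      have hx : sx = 0 := by
        have : ((k : Int) + 1) * sx = 0 := by omega
        rcases mul_eq_zero.1 this with h' | h'
        · exfalso; have : (0:Int) ≤ (k:Int) := Int.natCast_nonneg k; omega
        · exact h'
      have hy : sy = 0 := by
        have : ((k : Int) + 1) * sy = 0 := by omega
        rcases mul_eq_zero.1 this with h' | h'
        · exfalso; have : (0:Int) ≤ (k:Int) := Int.natCast_nonneg k; omega
        · exact h'
      exact hs ⟨hx, hy⟩
    have hstep :
        pvWalkBack origin sx sy (k + 1 + 1)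
          (origin.1 + ((k : Int) + 1) * sx, origin.2 + ((k : Int) + 1) * sy) acc
        = pvWalkBack origin sx sy (k + 1)
            (origin.1 + (k : Int) * sx, origin.2 + (k : Int) * sy)
            (acc ++ [(origin.1 + ((k : Int) + 1) * sx, origin.2 + ((k : Int) + 1) * sy)]) := by
      rw [pvWalkBack, if_neg hne]
      congr 1
      simp only [Prod.mk.injEq]; constructor <;> ring
    push_cast
    rw [hstep, ih]
    rw [List.range_succ_eq_map]
    simp only [List.map_cons, List.map_map, List.append_assoc, List.singleton_append]
    congr 1
    congr 1
    all_goals norm_num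

-- ===== VERDICT (by name: the statement is the Claim_ definition above) =====
theorem get_intermediate_steps_spec : Claim_equal_get_intermediate_steps := by
  intro origin goal _
  unfold Spec_get_intermediate_steps get_intermediate_steps get_intermediate_steps_alt
  simp only []
  set dx := goal.1 - origin.1 with hdx
  set dy := goal.2 - origin.2 with hdy
  set sx := (if dx > 0 then (1 : Int) else 0) - (if dx < 0 then 1 else 0) with hsx
  set sy := (if dy > 0 then (1 : Int) else 0) - (if dy < 0 then 1 else 0) with hsy
  have hix : (if |dx| ≠ 0 then PySem.Int.floordiv dx |dx| else 0) = sx := by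
    by_cases h : dx = 0
    · simp [hsx, h]
    · rw [if_pos (by simpa using h), pv_floordiv_abs_eq_sign dx h]
  have hiy : (if |dy| ≠ 0 then PySem.Int.floordiv dy |dy| else 0) = sy := by
    by_cases h : dy = 0
    · simp [hsy, h]
    · rw [if_pos (by simpa using h), pv_floordiv_abs_eq_sign dy h]
  rw [hix, hiy, pv_loop_eq]
  set n := max |dx| |dy| with hn
  have hn0 : 0 ≤ n := le_trans (abs_nonneg dx) (le_max_left _ _)
  have hcast : ((n.toNat : Int)) = n := Int.toNat_of_nonneg hn0
  by_cases hz : n = 0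
  · have : n.toNat = 0 := by omega
    rw [this]
    simp [pvWalkBack, show origin.1 + n * sx = origin.1 by rw [hz]; ring,
          show origin.2 + n * sy = origin.2 by rw [hz]; ring]
  · have hs : ¬ (sx = 0 ∧ sy = 0) := by
      rintro ⟨h1, h2⟩
      rw [hsx] at h1
      rw [hsy] at h2
      have hdx0 : dx = 0 := by
        rcases lt_trichotomy dx 0 with hh | hh | hh
        · rw [if_neg (by omega), if_pos hh] at h1; omega
        · exact hh
        · rw [if_pos hh, if_neg (by omega)] at h1; omega
      have hdy0 : dy = 0 := by
        rcases lt_trichotomy dy 0 with hh | hh | hh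
        · rw [if_neg (by omega), if_pos hh] at h2; omega
        · exact hh
        · rw [if_pos hh, if_neg (by omega)] at h2; omega
      exact hz (by rw [hn, hdx0, hdy0]; simp)
    have hlast : ((origin.1 + n * sx, origin.2 + n * sy) : Int × Int)
        = (origin.1 + (n.toNat : Int) * sx, origin.2 + (n.toNat : Int) * sy) := by
      rw [hcast]
    rw [hlast, pv_walkback_eq origin sx sy hs n.toNat []]
    simp only [List.nil_append]
    apply List.ext_getElem
    · simp
    · intro i h1 h2
      simp only [List.getElem_map, List.getElem_range, List.getElem_reverse, List.length_map,
        List.length_range] at *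
      have hi : i < n.toNat := by simpa using h1
      have hc : ((n.toNat - 1 - i : Nat) : Int) = (n.toNat : Int) - 1 - (i : Int) := by omega
      simp only [Prod.mk.injEq, hc]
      constructor <;> ring
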